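-- pv_equiv track=rewrite | github.com/fmarcinek/Artificial-Intelligence | lista1/z1/depracatedAIChess.py | getTowerNeighs
-- ===== SOURCE A (Python) =====
-- filter_funcs = {
--     "up"    : lambda wt,oth : wt[0] == oth[0] and oth[1] < wt[1],
--     "down"  : lambda wt,oth : wt[0] == oth[0] and oth[1] > wt[1],
--     "left"  : lambda wt,oth : wt[1] == oth[1] and oth[0] < wt[0],
--     "right" : lambda wt,oth : wt[1] == oth[1] and oth[0] > wt[0]
-- }
--
-- return_funcs = {
--     "up"    : lambda wt,con,bk,wk : [(bk,wk,(wt[0],y)) for y in range(con+1,wt[1])],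
--     "down"  : lambda wt,con,bk,wk : [(bk,wk,(wt[0],y)) for y in range(wt[1]+1,con)],
--     "left"  : lambda wt,con,bk,wk : [(bk,wk,(x,wt[1])) for x in range(con+1,wt[0])],
--     "right" : lambda wt,con,bk,wk : [(bk,wk,(x,wt[1])) for x in range(wt[0]+1,con)]
-- }
--
-- def getTowerNeighs(bk,wk,wt,side):
--     a = wt[0]
--     res = [oth for oth in [bk,wk] if filter_funcs[side](wt,oth)]
--
--     if len(res) == 0:
--         if side == "left" or side == "up":
--             constraint = 0
--         else:
--             constraint = 9
--     if len(res) == 1: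
--         if a == res[0][0]:
--             constraint = res[0][1]
--         else:
--             constraint = res[0][0]
--     elif len(res) == 2:
--         if a == res[0][0]:
--             if side == "up":
--                 constraint = max(res[0][1],res[1][1])
--             else:
--                 constraint = min(res[0][1],res[1][1])
--         else:
--             if side == "left":
--                 constraint = max(res[0][0],res[1][0])
--             else:
--                 constraint = min(res[0][0],res[1][0])
--
--     return return_funcs[side](wt,constraint,bk,wk)
-- ===== SOURCE B (Python) =====
-- DIRS = {"up": (0, -1), "down": (0, 1), "left": (-1, 0), "right": (1, 0)}
--
-- def getTowerNeighs(bk, wk, wt, side):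
--     # Slide square by square away from the tower, stopping at a king or when the
--     # moving coordinate leaves the board on the far side (past 1 going up/left,
--     # past 8 going down/right); up/left walks descend, so reverse for A's order.
--     dx, dy = DIRS[side]
--     edge = 8 if dx + dy > 0 else -1
--     x, y = wt[0] + dx, wt[1] + dy
--     squares = []
--     while dx * x + dy * y <= edge and (x, y) != bk and (x, y) != wk:
--         squares.append((x, y))
--         x, y = x + dx, y + dy
--     if dx + dy < 0:
--         squares.reverse()
--     return [(bk, wk, sq) for sq in squares]
-- ===== Notes on version B (the rewrite author's own statement) =====
-- stated objective: alternative
-- what changed: Replaced A's two-pass classify-blockers-then-emit-range scheme (filter the kings, pick min/max with a 0/9 default, emit one range) by a single stateful slide: step square by square away from the tower, appending empty squares until a king or the board edge stops the walk, reversing for up/left to keep A's ascending order.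
-- intended difference: On inputs whose only blocking king(s) on the ray sit beyond the board edge (coordinate <= -1 for up/left, >= 10 for down/right) with empty squares reaching past the edge, A emits squares outside the 1..8 board up to that blocker, while B stops at the board edge; stopping at the edge is the intended behaviour for a chessboard. — e.g. on getTowerNeighs((3, -2), (9, 9), (3, 5), "up"): A returns [((3, -2), (9, 9), (3, -1)), ((3, -2), (9, 9), (3, 0)), ((3, -2), (9, 9), (3, 1)), ((3, -2), (9, 9), (3, 2)), ((3, -2),…, B returns [((3, -2), (9, 9), (3, 1)), ((3, -2), (9, 9), (3, 2)), ((3, -2), (9, 9), (3, 3)), ((3, -2), (9, 9), (3, 4))]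
import Mathlib
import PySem

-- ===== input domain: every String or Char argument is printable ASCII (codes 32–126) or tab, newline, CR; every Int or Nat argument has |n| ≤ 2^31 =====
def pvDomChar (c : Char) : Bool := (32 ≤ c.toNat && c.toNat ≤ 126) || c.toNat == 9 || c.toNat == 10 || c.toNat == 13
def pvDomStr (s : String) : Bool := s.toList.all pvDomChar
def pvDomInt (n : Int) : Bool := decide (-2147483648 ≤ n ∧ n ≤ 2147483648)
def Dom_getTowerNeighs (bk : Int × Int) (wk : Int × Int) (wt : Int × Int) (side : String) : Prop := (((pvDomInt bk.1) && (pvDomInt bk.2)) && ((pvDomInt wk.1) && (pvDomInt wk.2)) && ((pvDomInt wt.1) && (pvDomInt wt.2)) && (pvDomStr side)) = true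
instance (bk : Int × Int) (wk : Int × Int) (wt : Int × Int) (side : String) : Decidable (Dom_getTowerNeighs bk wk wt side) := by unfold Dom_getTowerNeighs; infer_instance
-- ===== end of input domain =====

-- B replaces A's per-side lambda dicts and 0/1/2-blocker case analysis by a square-by-square slide
-- away from the tower that stops at a king or the board edge (alternative algorithm, same cost);
-- where the only blockers lie beyond the board edge, A emits off-board squares and B stops at the
-- edge — stated as the intended difference D_ below.


-- ===== PORT A =====
-- filter_funcs[side]; for a side not among the four keys Python raises KeyError (excluded by Pre_), here: false
def pvFilterA (side : String) (wt oth : Int × Int) : Bool :=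
  if side == "up" then wt.1 == oth.1 && oth.2 < wt.2
  else if side == "down" then wt.1 == oth.1 && oth.2 > wt.2
  else if side == "left" then wt.2 == oth.2 && oth.1 < wt.1
  else if side == "right" then wt.2 == oth.2 && oth.1 > wt.1
  else false

-- return_funcs[side]; for a side not among the four keys Python raises KeyError (excluded by Pre_), here: []
def pvReturnA (side : String) (wt : Int × Int) (con : Int) (bk wk : Int × Int) :
    List ((Int × Int) × (Int × Int) × (Int × Int)) :=
  if side == "up" then (PySem.List.pyRange (con + 1) wt.2 1).map (fun y => (bk, wk, (wt.1, y)))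
  else if side == "down" then (PySem.List.pyRange (wt.2 + 1) con 1).map (fun y => (bk, wk, (wt.1, y)))
  else if side == "left" then (PySem.List.pyRange (con + 1) wt.1 1).map (fun x => (bk, wk, (x, wt.2)))
  else if side == "right" then (PySem.List.pyRange (wt.1 + 1) con 1).map (fun x => (bk, wk, (x, wt.2)))
  else []

def getTowerNeighs (bk : Int × Int) (wk : Int × Int) (wt : Int × Int) (side : String) :
    List ((Int × Int) × (Int × Int) × (Int × Int)) :=
  let a := wt.1
  let res := [bk, wk].filter (fun oth => pvFilterA side wt oth)
  -- res[0]/res[1]: Python indexes only under the matching length test, so the index is in range;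
  -- the .getD (0,0) default is never reached.
  let constraint : Int :=
    if res.length == 0 then (if side == "left" || side == "up" then 0 else 9)
    else if res.length == 1 then
      let r0 := (PySem.List.pyGet? res 0).getD (0, 0)
      if a == r0.1 then r0.2 else r0.1
    else
      let r0 := (PySem.List.pyGet? res 0).getD (0, 0)
      let r1 := (PySem.List.pyGet? res 1).getD (0, 0)
      if a == r0.1 then (if side == "up" then max r0.2 r1.2 else min r0.2 r1.2)
      else (if side == "left" then max r0.1 r1.1 else min r0.1 r1.1)
  pvReturnA side wt constraint bk wk

-- ===== PORT B =====
-- the while loop of Source B: slide one square at a time; fuel = number of squares to the far edge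
-- (the loop's own bound 'dx*x + dy*y ≤ edge', made structural)
def pvWalk (bk wk : Int × Int) (dx dy edge : Int) : Int → Int → Nat → List (Int × Int)
  | _, _, 0 => []
  | x, y, fuel + 1 =>
    if dx * x + dy * y ≤ edge ∧ (x, y) ≠ bk ∧ (x, y) ≠ wk then
      (x, y) :: pvWalk bk wk dx dy edge (x + dx) (y + dy) fuel
    else []

def getTowerNeighs_alt (bk : Int × Int) (wk : Int × Int) (wt : Int × Int) (side : String) :
    List ((Int × Int) × (Int × Int) × (Int × Int)) :=
  -- DIRS[side]; a side not among the four keys raises KeyError (excluded by Pre_): default value here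
  let d : Int × Int :=
    if side == "up" then (0, -1) else if side == "down" then (0, 1)
    else if side == "left" then (-1, 0) else if side == "right" then (1, 0) else (0, 1)
  let dx := d.1
  let dy := d.2
  let edge : Int := if dx + dy > 0 then 8 else -1
  let x := wt.1 + dx
  let y := wt.2 + dy
  let squares := pvWalk bk wk dx dy edge x y (edge + 1 - (dx * x + dy * y)).toNat
  let squares' := if dx + dy < 0 then squares.reverse else squares
  squares'.map (fun sq => (bk, wk, sq))

-- ===== PRECONDITION & SPEC =====
-- Pre_ excludes exactly the side strings other than the four direction keys, on which A raises KeyError.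
def Pre_getTowerNeighs (bk : Int × Int) (wk : Int × Int) (wt : Int × Int) (side : String) : Prop :=
  side = "up" ∨ side = "down" ∨ side = "left" ∨ side = "right"
instance (bk : Int × Int) (wk : Int × Int) (wt : Int × Int) (side : String) : Decidable (Pre_getTowerNeighs bk wk wt side) := by unfold Pre_getTowerNeighs; infer_instance

def pvWitness_getTowerNeighs : (Int × Int) × (Int × Int) × (Int × Int) × String := ((3, 5), (6, 2), (3, 2), "up")

-- Inputs where every king blocking the ray lies beyond the board edge (coordinate ≤ -1 for up/left,
-- ≥ 10 for down/right) with empty squares between tower and blocker reaching past the edge: A emits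
-- squares outside the 1..8 board up to that blocker, B stops at the board edge, which is the intended
-- behaviour on a chessboard.
-- pvAx maps each side's ray to the canonical "down" frame: moving coordinate grows, board edge at 9.
def pvAx (s : String) (p : Int × Int) : Int × Int :=
  if s = "up" then (p.1, 9 - p.2) else if s = "down" then p
  else if s = "left" then (p.2, 9 - p.1) else (p.2, p.1)

-- k blocks the ray from the tower wt towards side s
def pvBlk (s : String) (wt k : Int × Int) : Prop :=
  (pvAx s k).1 = (pvAx s wt).1 ∧ (pvAx s wt).2 < (pvAx s k).2

def D_getTowerNeighs (bk : Int × Int) (wk : Int × Int) (wt : Int × Int) (side : String) : Prop :=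
  (∃ k ∈ [bk, wk], pvBlk side wt k) ∧
  ∀ k ∈ [bk, wk], pvBlk side wt k →
    10 ≤ (pvAx side k).2 ∧ (pvAx side wt).2 + 2 ≤ (pvAx side k).2
instance (bk : Int × Int) (wk : Int × Int) (wt : Int × Int) (side : String) : Decidable (D_getTowerNeighs bk wk wt side) := by unfold D_getTowerNeighs pvBlk pvAx; infer_instance

def Spec_getTowerNeighs (bk : Int × Int) (wk : Int × Int) (wt : Int × Int) (side : String) (out : List ((Int × Int) × (Int × Int) × (Int × Int))) : Prop := ¬ D_getTowerNeighs bk wk wt side → out = getTowerNeighs_alt bk wk wt side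
instance (bk : Int × Int) (wk : Int × Int) (wt : Int × Int) (side : String) (out : List ((Int × Int) × (Int × Int) × (Int × Int))) : Decidable (Spec_getTowerNeighs bk wk wt side out) := by unfold Spec_getTowerNeighs; infer_instance

def pvDiffWitness_getTowerNeighs : (Int × Int) × (Int × Int) × (Int × Int) × String := ((3, -2), (9, 9), (3, 5), "up")

def pvDiffWitnessOut_getTowerNeighs : (List ((Int × Int) × (Int × Int) × (Int × Int))) × (List ((Int × Int) × (Int × Int) × (Int × Int))) :=
  ([((3, -2), (9, 9), (3, -1)), ((3, -2), (9, 9), (3, 0)), ((3, -2), (9, 9), (3, 1)),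
    ((3, -2), (9, 9), (3, 2)), ((3, -2), (9, 9), (3, 3)), ((3, -2), (9, 9), (3, 4))],
   [((3, -2), (9, 9), (3, 1)), ((3, -2), (9, 9), (3, 2)), ((3, -2), (9, 9), (3, 3)),
    ((3, -2), (9, 9), (3, 4))])

-- ===== CLAIM (what is proved, stated in full; the proofs are below) =====
def Claim_unchanged_getTowerNeighs : Prop := ∀ (bk : Int × Int) (wk : Int × Int) (wt : Int × Int) (side : String), Dom_getTowerNeighs bk wk wt side → Pre_getTowerNeighs bk wk wt side → Spec_getTowerNeighs bk wk wt side (getTowerNeighs bk wk wt side)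
def Claim_changed_getTowerNeighs : Prop := Dom_getTowerNeighs (pvDiffWitness_getTowerNeighs.1) (pvDiffWitness_getTowerNeighs.2.1) (pvDiffWitness_getTowerNeighs.2.2.1) (pvDiffWitness_getTowerNeighs.2.2.2) ∧ Pre_getTowerNeighs (pvDiffWitness_getTowerNeighs.1) (pvDiffWitness_getTowerNeighs.2.1) (pvDiffWitness_getTowerNeighs.2.2.1) (pvDiffWitness_getTowerNeighs.2.2.2) ∧ D_getTowerNeighs (pvDiffWitness_getTowerNeighs.1) (pvDiffWitness_getTowerNeighs.2.1) (pvDiffWitness_getTowerNeighs.2.2.1) (pvDiffWitness_getTowerNeighs.2.2.2) ∧ getTowerNeighs (pvDiffWitness_getTowerNeighs.1) (pvDiffWitness_getTowerNeighs.2.1) (pvDiffWitness_getTowerNeighs.2.2.1) (pvDiffWitness_getTowerNeighs.2.2.2) = pvDiffWitnessOut_getTowerNeighs.1 ∧ getTowerNeighs_alt (pvDiffWitness_getTowerNeighs.1) (pvDiffWitness_getTowerNeighs.2.1) (pvDiffWitness_getTowerNeighs.2.2.1) (pvDiffWitness_getTowerNeighs.2.2.2) = pvDiffWitnessOut_getTowerNeighs.2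 ∧ pvDiffWitnessOut_getTowerNeighs.1 ≠ pvDiffWitnessOut_getTowerNeighs.2

def Claim_exact_getTowerNeighs : Prop := ∀ (bk : Int × Int) (wk : Int × Int) (wt : Int × Int) (side : String), Dom_getTowerNeighs bk wk wt side → Pre_getTowerNeighs bk wk wt side → D_getTowerNeighs bk wk wt side → getTowerNeighs bk wk wt side ≠ getTowerNeighs_alt bk wk wt side

-- ===== LEMMAS AND PROOFS =====

-- every square the walk emits satisfies the loop bound
lemma pv_mem_walk {bk wk : Int × Int} {dx dy edge : Int} :
    ∀ (fuel : Nat) (x y : Int) (p : Int × Int), p ∈ pvWalk bk wk dx dy edge x y fuel →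
      dx * p.1 + dy * p.2 ≤ edge := by
  intro fuel
  induction fuel with
  | zero => intro x y p h; simp [pvWalk] at h
  | succ n ih =>
    intro x y p h
    rw [pvWalk] at h
    by_cases hc : dx * x + dy * y ≤ edge ∧ (x, y) ≠ bk ∧ (x, y) ≠ wk
    · rw [if_pos hc] at h
      rcases List.mem_cons.mp h with rfl | h2
      · exact hc.1
      · exact ih _ _ _ h2
    · rw [if_neg hc] at h
      simp at h

-- with the nearest blocker past the edge, A's range holds an off-board square the walk cannot emit
lemma pv_absurd_up (bk wk wt : Int × Int) (con : Int) (h1 : con ≤ -1) (h2 : con ≤ wt.2 - 2)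
    (hEq : (PySem.List.pyRange (con + 1) wt.2 1).map (fun v => (bk, wk, (wt.1, v))) =
      ((pvWalk bk wk 0 (-1) (-1) wt.1 (wt.2 - 1) (wt.2 - 1).toNat).reverse).map
        (fun sq => (bk, wk, sq))) : False := by
  have hmem : (bk, wk, (wt.1, con + 1)) ∈
      (PySem.List.pyRange (con + 1) wt.2 1).map (fun v => (bk, wk, (wt.1, v))) :=
    List.mem_map.mpr ⟨con + 1, PySem.List.mem_pyRange_one.mpr ⟨le_refl _, by omega⟩, rfl⟩
  rw [hEq] at hmem
  obtain ⟨sq, hsq, heq⟩ := List.mem_map.mp hmem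
  have hb := pv_mem_walk _ _ _ _ (List.mem_reverse.mp hsq)
  have hsq2 : sq = (wt.1, con + 1) := by simpa using heq
  subst hsq2
  simp only at hb
  omega

lemma pv_absurd_down (bk wk wt : Int × Int) (con : Int) (h1 : 10 ≤ con) (h2 : wt.2 + 2 ≤ con)
    (hEq : (PySem.List.pyRange (wt.2 + 1) con 1).map (fun v => (bk, wk, (wt.1, v))) =
      (pvWalk bk wk 0 1 8 wt.1 (wt.2 + 1) (8 - wt.2).toNat).map (fun sq => (bk, wk, sq))) :
    False := by
  have hmem : (bk, wk, (wt.1, max (wt.2 + 1) 9)) ∈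
      (PySem.List.pyRange (wt.2 + 1) con 1).map (fun v => (bk, wk, (wt.1, v))) :=
    List.mem_map.mpr ⟨max (wt.2 + 1) 9, PySem.List.mem_pyRange_one.mpr ⟨le_max_left _ _, by omega⟩, rfl⟩
  rw [hEq] at hmem
  obtain ⟨sq, hsq, heq⟩ := List.mem_map.mp hmem
  have hb := pv_mem_walk _ _ _ _ hsq
  have hsq2 : sq = (wt.1, max (wt.2 + 1) 9) := by simpa using heq
  subst hsq2
  simp only at hb
  omega

lemma pv_absurd_left (bk wk wt : Int × Int) (con : Int) (h1 : con ≤ -1) (h2 : con ≤ wt.1 - 2)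
    (hEq : (PySem.List.pyRange (con + 1) wt.1 1).map (fun v => (bk, wk, (v, wt.2))) =
      ((pvWalk bk wk (-1) 0 (-1) (wt.1 - 1) wt.2 (wt.1 - 1).toNat).reverse).map
        (fun sq => (bk, wk, sq))) : False := by
  have hmem : (bk, wk, (con + 1, wt.2)) ∈
      (PySem.List.pyRange (con + 1) wt.1 1).map (fun v => (bk, wk, (v, wt.2))) :=
    List.mem_map.mpr ⟨con + 1, PySem.List.mem_pyRange_one.mpr ⟨le_refl _, by omega⟩, rfl⟩
  rw [hEq] at hmem
  obtain ⟨sq, hsq, heq⟩ := List.mem_map.mp hmem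
  have hb := pv_mem_walk _ _ _ _ (List.mem_reverse.mp hsq)
  have hsq2 : sq = (con + 1, wt.2) := by simpa using heq
  subst hsq2
  simp only at hb
  omega

lemma pv_absurd_right (bk wk wt : Int × Int) (con : Int) (h1 : 10 ≤ con) (h2 : wt.1 + 2 ≤ con)
    (hEq : (PySem.List.pyRange (wt.1 + 1) con 1).map (fun v => (bk, wk, (v, wt.2))) =
      (pvWalk bk wk 1 0 8 (wt.1 + 1) wt.2 (8 - wt.1).toNat).map (fun sq => (bk, wk, sq))) :
    False := by
  have hmem : (bk, wk, (max (wt.1 + 1) 9, wt.2)) ∈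
      (PySem.List.pyRange (wt.1 + 1) con 1).map (fun v => (bk, wk, (v, wt.2))) :=
    List.mem_map.mpr ⟨max (wt.1 + 1) 9, PySem.List.mem_pyRange_one.mpr ⟨le_max_left _ _, by omega⟩, rfl⟩
  rw [hEq] at hmem
  obtain ⟨sq, hsq, heq⟩ := List.mem_map.mp hmem
  have hb := pv_mem_walk _ _ _ _ hsq
  have hsq2 : sq = (max (wt.1 + 1) 9, wt.2) := by simpa using heq
  subst hsq2
  simp only at hb
  omega


-- The slide on the "low" sides (up/left): the moving coordinate is -(dx*x+dy*y), it decreases,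
-- and the walk from y down to the stop value con is the reversed ascending range (con+1 .. y].
lemma pv_walk_low_eq (bk wk : Int × Int) (dx dy : Int) (mk : Int → Int × Int)
    (hm : ∀ v, dx * (mk v).1 + dy * (mk v).2 = -v)
    (hstep : ∀ v, (mk v).1 + dx = (mk (v - 1)).1 ∧ (mk v).2 + dy = (mk (v - 1)).2)
    (con : Int) (hcon : 0 ≤ con)
    (hstop : con = 0 ∨ mk con = bk ∨ mk con = wk) :
    ∀ y : Int, con ≤ y →
      (∀ t : Int, con < t → t ≤ y → mk t ≠ bk ∧ mk t ≠ wk) →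
      pvWalk bk wk dx dy (-1) (mk y).1 (mk y).2 y.toNat =
        ((PySem.List.pyRange (con + 1) (y + 1) 1).map mk).reverse := by
  intro y hy
  induction y, hy using Int.le_induction with
  | base =>
    intro _
    rw [PySem.List.pyRange_one_eq_nil (by omega)]
    rcases eq_or_lt_of_le hcon with h0 | hpos
    · have : con.toNat = 0 := by omega
      rw [this]; simp [pvWalk]
    · obtain ⟨k, hk⟩ : ∃ k, con.toNat = k + 1 := ⟨con.toNat - 1, by omega⟩
      rw [hk, pvWalk, if_neg]
      · simp
      · rintro ⟨-, hne1, hne2⟩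
        rcases hstop with h | h | h
        · omega
        · exact hne1 h
        · exact hne2 h
  | succ n hn ih =>
    intro hfree
    have h1 : (n + 1).toNat = n.toNat + 1 := by omega
    rw [h1, pvWalk, if_pos]
    · rw [(hstep (n + 1)).1, (hstep (n + 1)).2]
      have hmk : n + 1 - 1 = n := by ring
      rw [hmk, ih (fun t ht1 ht2 => hfree t ht1 (by omega))]
      have h2 : PySem.List.pyRange (con + 1) (n + 1 + 1) 1 =
          PySem.List.pyRange (con + 1) (n + 1) 1 ++ [n + 1] :=
        PySem.List.pyRange_one_succ_right (by omega)
      rw [h2]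
      simp
    · refine ⟨by rw [hm]; omega, (hfree (n + 1) (by omega) le_rfl).1,
        (hfree (n + 1) (by omega) le_rfl).2⟩

-- The slide on the "high" sides (down/right): the moving coordinate is dx*x+dy*y, it increases,
-- and the walk from y up to the stop value con is the ascending range [y .. con).
lemma pv_walk_high_eq (bk wk : Int × Int) (dx dy : Int) (mk : Int → Int × Int)
    (hm : ∀ v, dx * (mk v).1 + dy * (mk v).2 = v)
    (hstep : ∀ v, (mk v).1 + dx = (mk (v + 1)).1 ∧ (mk v).2 + dy = (mk (v + 1)).2)
    (con : Int) (hcon : con ≤ 9)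
    (hstop : con = 9 ∨ mk con = bk ∨ mk con = wk) :
    ∀ y : Int, y ≤ con →
      (∀ t : Int, y ≤ t → t < con → mk t ≠ bk ∧ mk t ≠ wk) →
      pvWalk bk wk dx dy 8 (mk y).1 (mk y).2 (9 - y).toNat =
        (PySem.List.pyRange y con 1).map mk := by
  intro y hy
  induction y, hy using Int.le_induction_down with
  | base =>
    intro _
    rw [PySem.List.pyRange_one_eq_nil (by omega)]
    rcases eq_or_lt_of_le hcon with h9 | hlt
    · have : (9 - con).toNat = 0 := by omega
      rw [this]; simp [pvWalk]
    · obtain ⟨k, hk⟩ : ∃ k, (9 - con).toNat = k + 1 := ⟨(9 - con).toNat - 1, by omega⟩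
      rw [hk, pvWalk, if_neg]
      · simp
      · rintro ⟨-, hne1, hne2⟩
        rcases hstop with h | h | h
        · omega
        · exact hne1 h
        · exact hne2 h
  | pred n hn ih =>
    intro hfree
    have h1 : (9 - (n - 1)).toNat = (9 - n).toNat + 1 := by omega
    rw [h1, pvWalk, if_pos]
    · rw [(hstep (n - 1)).1, (hstep (n - 1)).2]
      have hmk : n - 1 + 1 = n := by ring
      rw [hmk, ih (fun t ht1 ht2 => hfree t (by omega) ht2)]
      rw [PySem.List.pyRange_one_cons (show n - 1 < con by omega)]
      simp
    · refine ⟨by rw [hm]; omega, (hfree (n - 1) le_rfl (by omega)).1,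
        (hfree (n - 1) le_rfl (by omega)).2⟩

-- Reductions of B's port to the four concrete walks
lemma pv_alt_up (bk wk wt : Int × Int) :
    getTowerNeighs_alt bk wk wt "up" =
      ((pvWalk bk wk 0 (-1) (-1) wt.1 (wt.2 - 1) (wt.2 - 1).toNat).reverse).map
        (fun sq => (bk, wk, sq)) := by
  show ((pvWalk bk wk 0 (-1) (-1) (wt.1 + 0) (wt.2 + -1)
      ((-1) + 1 - (0 * (wt.1 + 0) + (-1) * (wt.2 + -1))).toNat).reverse).map _ = _
  have h3 : (-1) + 1 - (0 * (wt.1 + 0) + (-1) * (wt.2 + -1)) = wt.2 - 1 := by ring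
  have h1 : wt.1 + 0 = wt.1 := by ring
  have h2 : wt.2 + -1 = wt.2 - 1 := by ring
  rw [h3, h1, h2]

lemma pv_alt_down (bk wk wt : Int × Int) :
    getTowerNeighs_alt bk wk wt "down" =
      (pvWalk bk wk 0 1 8 wt.1 (wt.2 + 1) (8 - wt.2).toNat).map (fun sq => (bk, wk, sq)) := by
  show (pvWalk bk wk 0 1 8 (wt.1 + 0) (wt.2 + 1)
      (8 + 1 - (0 * (wt.1 + 0) + 1 * (wt.2 + 1))).toNat).map _ = _
  have h3 : 8 + 1 - (0 * (wt.1 + 0) + 1 * (wt.2 + 1)) = 8 - wt.2 := by ring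
  have h1 : wt.1 + 0 = wt.1 := by ring
  rw [h3, h1]

lemma pv_alt_left (bk wk wt : Int × Int) :
    getTowerNeighs_alt bk wk wt "left" =
      ((pvWalk bk wk (-1) 0 (-1) (wt.1 - 1) wt.2 (wt.1 - 1).toNat).reverse).map
        (fun sq => (bk, wk, sq)) := by
  show ((pvWalk bk wk (-1) 0 (-1) (wt.1 + -1) (wt.2 + 0)
      ((-1) + 1 - ((-1) * (wt.1 + -1) + 0 * (wt.2 + 0))).toNat).reverse).map _ = _
  have h3 : (-1) + 1 - ((-1) * (wt.1 + -1) + 0 * (wt.2 + 0)) = wt.1 - 1 := by ring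
  have h1 : wt.1 + -1 = wt.1 - 1 := by ring
  have h2 : wt.2 + 0 = wt.2 := by ring
  rw [h3, h1, h2]

lemma pv_alt_right (bk wk wt : Int × Int) :
    getTowerNeighs_alt bk wk wt "right" =
      (pvWalk bk wk 1 0 8 (wt.1 + 1) wt.2 (8 - wt.1).toNat).map (fun sq => (bk, wk, sq)) := by
  show (pvWalk bk wk 1 0 8 (wt.1 + 1) (wt.2 + 0)
      (8 + 1 - (1 * (wt.1 + 1) + 0 * (wt.2 + 0))).toNat).map _ = _
  have h3 : 8 + 1 - (1 * (wt.1 + 1) + 0 * (wt.2 + 0)) = 8 - wt.1 := by ring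
  have h2 : wt.2 + 0 = wt.2 := by ring
  rw [h3, h2]

lemma pv_up_finish (bk wk wt : Int × Int) (con : Int) (h0 : 0 ≤ con) (hlt : con < wt.2)
    (hstop : con = 0 ∨ (wt.1, con) = bk ∨ (wt.1, con) = wk)
    (hfree : ∀ t, con < t → t < wt.2 → (wt.1, t) ≠ bk ∧ (wt.1, t) ≠ wk) :
    (PySem.List.pyRange (con + 1) wt.2 1).map (fun v => (bk, wk, (wt.1, v))) =
      ((pvWalk bk wk 0 (-1) (-1) wt.1 (wt.2 - 1) (wt.2 - 1).toNat).reverse).map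
        (fun sq => (bk, wk, sq)) := by
  have hw := pv_walk_low_eq bk wk 0 (-1) (fun v => (wt.1, v))
    (fun v => by ring) (fun v => by constructor <;> ring) con h0 hstop
    (wt.2 - 1) (by omega) (fun t ht1 ht2 => hfree t ht1 (by omega))
  simp only at hw
  rw [hw]
  have : wt.2 - 1 + 1 = wt.2 := by ring
  rw [this]
  simp [List.map_map, Function.comp]

lemma pv_up_empty (bk wk wt : Int × Int) (con : Int) (h : wt.2 ≤ 0) (h2 : wt.2 ≤ con + 1) :
    (PySem.List.pyRange (con + 1) wt.2 1).map (fun v => (bk, wk, (wt.1, v))) =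
      ((pvWalk bk wk 0 (-1) (-1) wt.1 (wt.2 - 1) (wt.2 - 1).toNat).reverse).map
        (fun sq => (bk, wk, sq)) := by
  have hf : (wt.2 - 1).toNat = 0 := by omega
  rw [hf, PySem.List.pyRange_one_eq_nil (by omega)]
  simp [pvWalk]

lemma pv_down_finish (bk wk wt : Int × Int) (con : Int) (hy : wt.2 + 1 ≤ con) (h9 : con ≤ 9)
    (hstop : con = 9 ∨ (wt.1, con) = bk ∨ (wt.1, con) = wk)
    (hfree : ∀ t, wt.2 < t → t < con → (wt.1, t) ≠ bk ∧ (wt.1, t) ≠ wk) :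
    (PySem.List.pyRange (wt.2 + 1) con 1).map (fun v => (bk, wk, (wt.1, v))) =
      (pvWalk bk wk 0 1 8 wt.1 (wt.2 + 1) (8 - wt.2).toNat).map (fun sq => (bk, wk, sq)) := by
  have hw := pv_walk_high_eq bk wk 0 1 (fun v => (wt.1, v))
    (fun v => by ring) (fun v => by constructor <;> ring) con h9 hstop
    (wt.2 + 1) hy (fun t ht1 ht2 => hfree t (by omega) ht2)
  simp only at hw
  have hf : (9 - (wt.2 + 1)).toNat = (8 - wt.2).toNat := by omega
  rw [hf] at hw
  rw [hw]
  simp [List.map_map, Function.comp]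

lemma pv_down_empty (bk wk wt : Int × Int) (con : Int) (h : 8 ≤ wt.2) (h2 : con ≤ wt.2 + 1) :
    (PySem.List.pyRange (wt.2 + 1) con 1).map (fun v => (bk, wk, (wt.1, v))) =
      (pvWalk bk wk 0 1 8 wt.1 (wt.2 + 1) (8 - wt.2).toNat).map (fun sq => (bk, wk, sq)) := by
  have hf : (8 - wt.2).toNat = 0 := by omega
  rw [hf, PySem.List.pyRange_one_eq_nil (by omega)]
  simp [pvWalk]

lemma pv_left_finish (bk wk wt : Int × Int) (con : Int) (h0 : 0 ≤ con) (hlt : con < wt.1)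
    (hstop : con = 0 ∨ (con, wt.2) = bk ∨ (con, wt.2) = wk)
    (hfree : ∀ t, con < t → t < wt.1 → (t, wt.2) ≠ bk ∧ (t, wt.2) ≠ wk) :
    (PySem.List.pyRange (con + 1) wt.1 1).map (fun v => (bk, wk, (v, wt.2))) =
      ((pvWalk bk wk (-1) 0 (-1) (wt.1 - 1) wt.2 (wt.1 - 1).toNat).reverse).map
        (fun sq => (bk, wk, sq)) := by
  have hw := pv_walk_low_eq bk wk (-1) 0 (fun v => (v, wt.2))
    (fun v => by ring) (fun v => by constructor <;> ring) con h0 hstop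
    (wt.1 - 1) (by omega) (fun t ht1 ht2 => hfree t ht1 (by omega))
  simp only at hw
  rw [hw]
  have : wt.1 - 1 + 1 = wt.1 := by ring
  rw [this]
  simp [List.map_map, Function.comp]

lemma pv_left_empty (bk wk wt : Int × Int) (con : Int) (h : wt.1 ≤ 0) (h2 : wt.1 ≤ con + 1) :
    (PySem.List.pyRange (con + 1) wt.1 1).map (fun v => (bk, wk, (v, wt.2))) =
      ((pvWalk bk wk (-1) 0 (-1) (wt.1 - 1) wt.2 (wt.1 - 1).toNat).reverse).map
        (fun sq => (bk, wk, sq)) := by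
  have hf : (wt.1 - 1).toNat = 0 := by omega
  rw [hf, PySem.List.pyRange_one_eq_nil (by omega)]
  simp [pvWalk]

lemma pv_right_finish (bk wk wt : Int × Int) (con : Int) (hy : wt.1 + 1 ≤ con) (h9 : con ≤ 9)
    (hstop : con = 9 ∨ (con, wt.2) = bk ∨ (con, wt.2) = wk)
    (hfree : ∀ t, wt.1 < t → t < con → (t, wt.2) ≠ bk ∧ (t, wt.2) ≠ wk) :
    (PySem.List.pyRange (wt.1 + 1) con 1).map (fun v => (bk, wk, (v, wt.2))) =
      (pvWalk bk wk 1 0 8 (wt.1 + 1) wt.2 (8 - wt.1).toNat).map (fun sq => (bk, wk, sq)) := by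
  have hw := pv_walk_high_eq bk wk 1 0 (fun v => (v, wt.2))
    (fun v => by ring) (fun v => by constructor <;> ring) con h9 hstop
    (wt.1 + 1) hy (fun t ht1 ht2 => hfree t (by omega) ht2)
  simp only at hw
  have hf : (9 - (wt.1 + 1)).toNat = (8 - wt.1).toNat := by omega
  rw [hf] at hw
  rw [hw]
  simp [List.map_map, Function.comp]

lemma pv_right_empty (bk wk wt : Int × Int) (con : Int) (h : 8 ≤ wt.1) (h2 : con ≤ wt.1 + 1) :
    (PySem.List.pyRange (wt.1 + 1) con 1).map (fun v => (bk, wk, (v, wt.2))) =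
      (pvWalk bk wk 1 0 8 (wt.1 + 1) wt.2 (8 - wt.1).toNat).map (fun sq => (bk, wk, sq)) := by
  have hf : (8 - wt.1).toNat = 0 := by omega
  rw [hf, PySem.List.pyRange_one_eq_nil (by omega)]
  simp [pvWalk]

-- pair inequality / equality from coordinate facts
lemma pv_ne_of_snd {a b : Int × Int} (h : a.2 ≠ b.2) : a ≠ b := fun he => h (by rw [he])
lemma pv_ne_of_fst {a b : Int × Int} (h : a.1 ≠ b.1) : a ≠ b := fun he => h (by rw [he])
lemma pv_pair_v (wt k : Int × Int) (h : k.1 = wt.1) : (wt.1, k.2) = k := by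
  obtain ⟨a, b⟩ := k; cases h; rfl
lemma pv_pair_h (wt k : Int × Int) (h : k.2 = wt.2) : (k.1, wt.2) = k := by
  obtain ⟨a, b⟩ := k; cases h; rfl

-- a king that does not block the ray is never met by the walk
lemma pv_free_up (wt k : Int × Int) (hk : ¬(k.1 = wt.1 ∧ k.2 < wt.2)) (t : Int)
    (ht : t < wt.2) : (wt.1, t) ≠ k := fun he => by subst he; exact hk ⟨rfl, ht⟩
lemma pv_free_down (wt k : Int × Int) (hk : ¬(k.1 = wt.1 ∧ wt.2 < k.2)) (t : Int)
    (ht : wt.2 < t) : (wt.1, t) ≠ k := fun he => by subst he; exact hk ⟨rfl, ht⟩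
lemma pv_free_left (wt k : Int × Int) (hk : ¬(k.2 = wt.2 ∧ k.1 < wt.1)) (t : Int)
    (ht : t < wt.1) : (t, wt.2) ≠ k := fun he => by subst he; exact hk ⟨rfl, ht⟩
lemma pv_free_right (wt k : Int × Int) (hk : ¬(k.2 = wt.2 ∧ wt.1 < k.1)) (t : Int)
    (ht : wt.1 < t) : (t, wt.2) ≠ k := fun he => by subst he; exact hk ⟨rfl, ht⟩

lemma pv_side_up (bk wk wt : Int × Int)
    (hD : ¬ ((∃ k ∈ [bk, wk], pvBlk "up" wt k) ∧
      ∀ k ∈ [bk, wk], pvBlk "up" wt k →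
        10 ≤ (pvAx "up" k).2 ∧ (pvAx "up" wt).2 + 2 ≤ (pvAx "up" k).2)) :
    getTowerNeighs bk wk wt "up" = getTowerNeighs_alt bk wk wt "up" := by
  rw [pv_alt_up]
  by_cases hb : bk.1 = wt.1 ∧ bk.2 < wt.2 <;> by_cases hw : wk.1 = wt.1 ∧ wk.2 < wt.2
  · -- both kings block
    have hkb : pvFilterA "up" wt bk = true := by simp [pvFilterA, hb.1, hb.2]
    have hkw : pvFilterA "up" wt wk = true := by simp [pvFilterA, hw.1, hw.2]
    have hA : getTowerNeighs bk wk wt "up" =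
        (PySem.List.pyRange (max bk.2 wk.2 + 1) wt.2 1).map (fun v => (bk, wk, (wt.1, v))) := by
      simp [getTowerNeighs, List.filter, hkb, hkw, pvReturnA,
        PySem.List.pyGet?, PySem.List.pyIdx?, hb.1]
    have hDm : 0 ≤ max bk.2 wk.2 ∨ wt.2 - 2 < max bk.2 wk.2 := by
      by_contra hc
      push Not at hc
      refine hD ⟨⟨bk, by simp, by simp [pvBlk, pvAx]; omega⟩, ?_⟩
      intro k hk hkx
      simp only [List.mem_cons, List.not_mem_nil, or_false] at hk
      simp [pvBlk, pvAx] at hkx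
      simp only [pvAx]
      rcases hk with rfl | rfl <;> simp <;> omega
    rcases le_total bk.2 wk.2 with hm | hm
    · rw [max_eq_right hm] at hA hDm
      rw [hA]
      by_cases h0 : 0 ≤ wk.2
      · exact pv_up_finish bk wk wt (wk.2) (by omega) (by omega)
          (Or.inr (Or.inr (pv_pair_v wt wk hw.1)))
          (fun t ht1 ht2 => ⟨pv_ne_of_snd (show t ≠ bk.2 by omega), pv_ne_of_snd (show t ≠ wk.2 by omega)⟩)
      · have hgt : wt.2 - 2 < wk.2 := by rcases hDm with h | h <;> omega
        exact pv_up_empty bk wk wt (wk.2) (by omega) (by omega)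
    · rw [max_eq_left hm] at hA hDm
      rw [hA]
      by_cases h0 : 0 ≤ bk.2
      · exact pv_up_finish bk wk wt (bk.2) (by omega) (by omega)
          (Or.inr (Or.inl (pv_pair_v wt bk hb.1)))
          (fun t ht1 ht2 => ⟨pv_ne_of_snd (show t ≠ bk.2 by omega), pv_ne_of_snd (show t ≠ wk.2 by omega)⟩)
      · have hgt : wt.2 - 2 < bk.2 := by rcases hDm with h | h <;> omega
        exact pv_up_empty bk wk wt (bk.2) (by omega) (by omega)
  · -- only bk blocks
    have hkb : pvFilterA "up" wt bk = true := by simp [pvFilterA, hb.1, hb.2]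
    have hkw : pvFilterA "up" wt wk = false := by
      by_cases h1 : wk.1 = wt.1
      · have h2 : ¬ wk.2 < wt.2 := fun h2 => hw ⟨h1, h2⟩
        simp [pvFilterA, h1, h2]
      · have h2 : ¬ wt.1 = wk.1 := fun h => h1 h.symm
        simp [pvFilterA, h2]
    have hA : getTowerNeighs bk wk wt "up" =
        (PySem.List.pyRange (bk.2 + 1) wt.2 1).map (fun v => (bk, wk, (wt.1, v))) := by
      simp [getTowerNeighs, List.filter, hkb, hkw, pvReturnA,
        PySem.List.pyGet?, PySem.List.pyIdx?, hb.1]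
    have hDm : 0 ≤ bk.2 ∨ wt.2 - 2 < bk.2 := by
      by_contra hc
      push Not at hc
      refine hD ⟨⟨bk, by simp, by simp [pvBlk, pvAx]; omega⟩, ?_⟩
      intro k hk hkx
      simp only [List.mem_cons, List.not_mem_nil, or_false] at hk
      simp [pvBlk, pvAx] at hkx
      simp only [pvAx]
      rcases hk with rfl | rfl
      · simp; omega
      · exact absurd (And.intro hkx.1 (by omega)) hw
    rw [hA]
    by_cases h0 : 0 ≤ bk.2
    · exact pv_up_finish bk wk wt (bk.2) (by omega) (by omega)
        (Or.inr (Or.inl (pv_pair_v wt bk hb.1)))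
        (fun t ht1 ht2 => ⟨pv_ne_of_snd (show t ≠ bk.2 by omega), pv_free_up wt wk hw t (by omega)⟩)
    · have hgt : wt.2 - 2 < bk.2 := by rcases hDm with h | h <;> omega
      exact pv_up_empty bk wk wt (bk.2) (by omega) (by omega)
  · -- only wk blocks
    have hkb : pvFilterA "up" wt bk = false := by
      by_cases h1 : bk.1 = wt.1
      · have h2 : ¬ bk.2 < wt.2 := fun h2 => hb ⟨h1, h2⟩
        simp [pvFilterA, h1, h2]
      · have h2 : ¬ wt.1 = bk.1 := fun h => h1 h.symm
        simp [pvFilterA, h2]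
    have hkw : pvFilterA "up" wt wk = true := by simp [pvFilterA, hw.1, hw.2]
    have hA : getTowerNeighs bk wk wt "up" =
        (PySem.List.pyRange (wk.2 + 1) wt.2 1).map (fun v => (bk, wk, (wt.1, v))) := by
      simp [getTowerNeighs, List.filter, hkb, hkw, pvReturnA,
        PySem.List.pyGet?, PySem.List.pyIdx?, hw.1]
    have hDm : 0 ≤ wk.2 ∨ wt.2 - 2 < wk.2 := by
      by_contra hc
      push Not at hc
      refine hD ⟨⟨wk, by simp, by simp [pvBlk, pvAx]; omega⟩, ?_⟩
      intro k hk hkx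
      simp only [List.mem_cons, List.not_mem_nil, or_false] at hk
      simp [pvBlk, pvAx] at hkx
      simp only [pvAx]
      rcases hk with rfl | rfl
      · exact absurd (And.intro hkx.1 (by omega)) hb
      · simp; omega
    rw [hA]
    by_cases h0 : 0 ≤ wk.2
    · exact pv_up_finish bk wk wt (wk.2) (by omega) (by omega)
        (Or.inr (Or.inr (pv_pair_v wt wk hw.1)))
        (fun t ht1 ht2 => ⟨pv_free_up wt bk hb t (by omega), pv_ne_of_snd (show t ≠ wk.2 by omega)⟩)
    · have hgt : wt.2 - 2 < wk.2 := by rcases hDm with h | h <;> omega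
      exact pv_up_empty bk wk wt (wk.2) (by omega) (by omega)
  · -- no king blocks
    have hkb : pvFilterA "up" wt bk = false := by
      by_cases h1 : bk.1 = wt.1
      · have h2 : ¬ bk.2 < wt.2 := fun h2 => hb ⟨h1, h2⟩
        simp [pvFilterA, h1, h2]
      · have h2 : ¬ wt.1 = bk.1 := fun h => h1 h.symm
        simp [pvFilterA, h2]
    have hkw : pvFilterA "up" wt wk = false := by
      by_cases h1 : wk.1 = wt.1
      · have h2 : ¬ wk.2 < wt.2 := fun h2 => hw ⟨h1, h2⟩
        simp [pvFilterA, h1, h2]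
      · have h2 : ¬ wt.1 = wk.1 := fun h => h1 h.symm
        simp [pvFilterA, h2]
    have hA : getTowerNeighs bk wk wt "up" =
        (PySem.List.pyRange (0 + 1) wt.2 1).map (fun v => (bk, wk, (wt.1, v))) := by
      simp [getTowerNeighs, List.filter, hkb, hkw, pvReturnA]
    rw [hA]
    by_cases hpos : 1 ≤ wt.2
    · exact pv_up_finish bk wk wt ((0 : Int)) (by omega) (by omega)
        (Or.inl rfl)
        (fun t ht1 ht2 => ⟨pv_free_up wt bk hb t (by omega), pv_free_up wt wk hw t (by omega)⟩)
    · exact pv_up_empty bk wk wt 0 (by omega) (by omega)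

lemma pv_side_down (bk wk wt : Int × Int)
    (hD : ¬ ((∃ k ∈ [bk, wk], pvBlk "down" wt k) ∧
      ∀ k ∈ [bk, wk], pvBlk "down" wt k →
        10 ≤ (pvAx "down" k).2 ∧ (pvAx "down" wt).2 + 2 ≤ (pvAx "down" k).2)) :
    getTowerNeighs bk wk wt "down" = getTowerNeighs_alt bk wk wt "down" := by
  rw [pv_alt_down]
  by_cases hb : bk.1 = wt.1 ∧ wt.2 < bk.2 <;> by_cases hw : wk.1 = wt.1 ∧ wt.2 < wk.2
  · -- both kings block
    have hkb : pvFilterA "down" wt bk = true := by simp [pvFilterA, hb.1, hb.2]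
    have hkw : pvFilterA "down" wt wk = true := by simp [pvFilterA, hw.1, hw.2]
    have hA : getTowerNeighs bk wk wt "down" =
        (PySem.List.pyRange (wt.2 + 1) (min bk.2 wk.2) 1).map (fun v => (bk, wk, (wt.1, v))) := by
      simp [getTowerNeighs, List.filter, hkb, hkw, pvReturnA,
        PySem.List.pyGet?, PySem.List.pyIdx?, hb.1]
    have hDm : min bk.2 wk.2 ≤ 9 ∨ min bk.2 wk.2 < wt.2 + 2 := by
      by_contra hc
      push Not at hc
      refine hD ⟨⟨bk, by simp, by simp [pvBlk, pvAx]; omega⟩, ?_⟩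
      intro k hk hkx
      simp only [List.mem_cons, List.not_mem_nil, or_false] at hk
      simp [pvBlk, pvAx] at hkx
      simp only [pvAx]
      rcases hk with rfl | rfl <;> simp <;> omega
    rcases le_total bk.2 wk.2 with hm | hm
    · rw [min_eq_left hm] at hA hDm
      rw [hA]
      by_cases h9 : bk.2 ≤ 9
      · exact pv_down_finish bk wk wt (bk.2) (by omega) (by omega)
          (Or.inr (Or.inl (pv_pair_v wt bk hb.1)))
          (fun t ht1 ht2 => ⟨pv_ne_of_snd (show t ≠ bk.2 by omega), pv_ne_of_snd (show t ≠ wk.2 by omega)⟩)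
      · have hlt2 : bk.2 < wt.2 + 2 := by rcases hDm with h | h <;> omega
        exact pv_down_empty bk wk wt (bk.2) (by omega) (by omega)
    · rw [min_eq_right hm] at hA hDm
      rw [hA]
      by_cases h9 : wk.2 ≤ 9
      · exact pv_down_finish bk wk wt (wk.2) (by omega) (by omega)
          (Or.inr (Or.inr (pv_pair_v wt wk hw.1)))
          (fun t ht1 ht2 => ⟨pv_ne_of_snd (show t ≠ bk.2 by omega), pv_ne_of_snd (show t ≠ wk.2 by omega)⟩)
      · have hlt2 : wk.2 < wt.2 + 2 := by rcases hDm with h | h <;> omega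
        exact pv_down_empty bk wk wt (wk.2) (by omega) (by omega)
  · -- only bk blocks
    have hkb : pvFilterA "down" wt bk = true := by simp [pvFilterA, hb.1, hb.2]
    have hkw : pvFilterA "down" wt wk = false := by
      by_cases h1 : wk.1 = wt.1
      · have h2 : ¬ wt.2 < wk.2 := fun h2 => hw ⟨h1, h2⟩
        simp [pvFilterA, h1, h2]
      · have h2 : ¬ wt.1 = wk.1 := fun h => h1 h.symm
        simp [pvFilterA, h2]
    have hA : getTowerNeighs bk wk wt "down" =
        (PySem.List.pyRange (wt.2 + 1) (bk.2) 1).map (fun v => (bk, wk, (wt.1, v))) := by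
      simp [getTowerNeighs, List.filter, hkb, hkw, pvReturnA,
        PySem.List.pyGet?, PySem.List.pyIdx?, hb.1]
    have hDm : bk.2 ≤ 9 ∨ bk.2 < wt.2 + 2 := by
      by_contra hc
      push Not at hc
      refine hD ⟨⟨bk, by simp, by simp [pvBlk, pvAx]; omega⟩, ?_⟩
      intro k hk hkx
      simp only [List.mem_cons, List.not_mem_nil, or_false] at hk
      simp [pvBlk, pvAx] at hkx
      simp only [pvAx]
      rcases hk with rfl | rfl
      · simp; omega
      · exact absurd (And.intro hkx.1 (by omega)) hw
    rw [hA]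
    by_cases h9 : bk.2 ≤ 9
    · exact pv_down_finish bk wk wt (bk.2) (by omega) (by omega)
        (Or.inr (Or.inl (pv_pair_v wt bk hb.1)))
        (fun t ht1 ht2 => ⟨pv_ne_of_snd (show t ≠ bk.2 by omega), pv_free_down wt wk hw t (by omega)⟩)
    · have hlt2 : bk.2 < wt.2 + 2 := by rcases hDm with h | h <;> omega
      exact pv_down_empty bk wk wt (bk.2) (by omega) (by omega)
  · -- only wk blocks
    have hkb : pvFilterA "down" wt bk = false := by
      by_cases h1 : bk.1 = wt.1
      · have h2 : ¬ wt.2 < bk.2 := fun h2 => hb ⟨h1, h2⟩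
        simp [pvFilterA, h1, h2]
      · have h2 : ¬ wt.1 = bk.1 := fun h => h1 h.symm
        simp [pvFilterA, h2]
    have hkw : pvFilterA "down" wt wk = true := by simp [pvFilterA, hw.1, hw.2]
    have hA : getTowerNeighs bk wk wt "down" =
        (PySem.List.pyRange (wt.2 + 1) (wk.2) 1).map (fun v => (bk, wk, (wt.1, v))) := by
      simp [getTowerNeighs, List.filter, hkb, hkw, pvReturnA,
        PySem.List.pyGet?, PySem.List.pyIdx?, hw.1]
    have hDm : wk.2 ≤ 9 ∨ wk.2 < wt.2 + 2 := by
      by_contra hc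
      push Not at hc
      refine hD ⟨⟨wk, by simp, by simp [pvBlk, pvAx]; omega⟩, ?_⟩
      intro k hk hkx
      simp only [List.mem_cons, List.not_mem_nil, or_false] at hk
      simp [pvBlk, pvAx] at hkx
      simp only [pvAx]
      rcases hk with rfl | rfl
      · exact absurd (And.intro hkx.1 (by omega)) hb
      · simp; omega
    rw [hA]
    by_cases h9 : wk.2 ≤ 9
    · exact pv_down_finish bk wk wt (wk.2) (by omega) (by omega)
        (Or.inr (Or.inr (pv_pair_v wt wk hw.1)))
        (fun t ht1 ht2 => ⟨pv_free_down wt bk hb t (by omega), pv_ne_of_snd (show t ≠ wk.2 by omega)⟩)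
    · have hlt2 : wk.2 < wt.2 + 2 := by rcases hDm with h | h <;> omega
      exact pv_down_empty bk wk wt (wk.2) (by omega) (by omega)
  · -- no king blocks
    have hkb : pvFilterA "down" wt bk = false := by
      by_cases h1 : bk.1 = wt.1
      · have h2 : ¬ wt.2 < bk.2 := fun h2 => hb ⟨h1, h2⟩
        simp [pvFilterA, h1, h2]
      · have h2 : ¬ wt.1 = bk.1 := fun h => h1 h.symm
        simp [pvFilterA, h2]
    have hkw : pvFilterA "down" wt wk = false := by
      by_cases h1 : wk.1 = wt.1
      · have h2 : ¬ wt.2 < wk.2 := fun h2 => hw ⟨h1, h2⟩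
        simp [pvFilterA, h1, h2]
      · have h2 : ¬ wt.1 = wk.1 := fun h => h1 h.symm
        simp [pvFilterA, h2]
    have hA : getTowerNeighs bk wk wt "down" =
        (PySem.List.pyRange (wt.2 + 1) (9) 1).map (fun v => (bk, wk, (wt.1, v))) := by
      simp [getTowerNeighs, List.filter, hkb, hkw, pvReturnA]
    rw [hA]
    by_cases hpos : wt.2 ≤ 8
    · exact pv_down_finish bk wk wt ((9 : Int)) (by omega) (by omega)
        (Or.inl rfl)
        (fun t ht1 ht2 => ⟨pv_free_down wt bk hb t (by omega), pv_free_down wt wk hw t (by omega)⟩)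
    · exact pv_down_empty bk wk wt 9 (by omega) (by omega)

lemma pv_side_left (bk wk wt : Int × Int)
    (hD : ¬ ((∃ k ∈ [bk, wk], pvBlk "left" wt k) ∧
      ∀ k ∈ [bk, wk], pvBlk "left" wt k →
        10 ≤ (pvAx "left" k).2 ∧ (pvAx "left" wt).2 + 2 ≤ (pvAx "left" k).2)) :
    getTowerNeighs bk wk wt "left" = getTowerNeighs_alt bk wk wt "left" := by
  rw [pv_alt_left]
  by_cases hb : bk.2 = wt.2 ∧ bk.1 < wt.1 <;> by_cases hw : wk.2 = wt.2 ∧ wk.1 < wt.1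
  · -- both kings block
    have hkb : pvFilterA "left" wt bk = true := by simp [pvFilterA, hb.1, hb.2]
    have hkw : pvFilterA "left" wt wk = true := by simp [pvFilterA, hw.1, hw.2]
    have hA : getTowerNeighs bk wk wt "left" =
        (PySem.List.pyRange (max bk.1 wk.1 + 1) wt.1 1).map (fun v => (bk, wk, (v, wt.2))) := by
      simp [getTowerNeighs, List.filter, hkb, hkw, pvReturnA,
        PySem.List.pyGet?, PySem.List.pyIdx?, (show ¬ wt.1 = bk.1 from by omega)]
    have hDm : 0 ≤ max bk.1 wk.1 ∨ wt.1 - 2 < max bk.1 wk.1 := by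
      by_contra hc
      push Not at hc
      refine hD ⟨⟨bk, by simp, by simp [pvBlk, pvAx]; omega⟩, ?_⟩
      intro k hk hkx
      simp only [List.mem_cons, List.not_mem_nil, or_false] at hk
      simp [pvBlk, pvAx] at hkx
      simp only [pvAx]
      rcases hk with rfl | rfl <;> simp <;> omega
    rcases le_total bk.1 wk.1 with hm | hm
    · rw [max_eq_right hm] at hA hDm
      rw [hA]
      by_cases h0 : 0 ≤ wk.1
      · exact pv_left_finish bk wk wt (wk.1) (by omega) (by omega)
          (Or.inr (Or.inr (pv_pair_h wt wk hw.1)))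
          (fun t ht1 ht2 => ⟨pv_ne_of_fst (show t ≠ bk.1 by omega), pv_ne_of_fst (show t ≠ wk.1 by omega)⟩)
      · have hgt : wt.1 - 2 < wk.1 := by rcases hDm with h | h <;> omega
        exact pv_left_empty bk wk wt (wk.1) (by omega) (by omega)
    · rw [max_eq_left hm] at hA hDm
      rw [hA]
      by_cases h0 : 0 ≤ bk.1
      · exact pv_left_finish bk wk wt (bk.1) (by omega) (by omega)
          (Or.inr (Or.inl (pv_pair_h wt bk hb.1)))
          (fun t ht1 ht2 => ⟨pv_ne_of_fst (show t ≠ bk.1 by omega), pv_ne_of_fst (show t ≠ wk.1 by omega)⟩)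
      · have hgt : wt.1 - 2 < bk.1 := by rcases hDm with h | h <;> omega
        exact pv_left_empty bk wk wt (bk.1) (by omega) (by omega)
  · -- only bk blocks
    have hkb : pvFilterA "left" wt bk = true := by simp [pvFilterA, hb.1, hb.2]
    have hkw : pvFilterA "left" wt wk = false := by
      by_cases h1 : wk.2 = wt.2
      · have h2 : ¬ wk.1 < wt.1 := fun h2 => hw ⟨h1, h2⟩
        simp [pvFilterA, h1, h2]
      · have h2 : ¬ wt.2 = wk.2 := fun h => h1 h.symm
        simp [pvFilterA, h2]
    have hA : getTowerNeighs bk wk wt "left" =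
        (PySem.List.pyRange (bk.1 + 1) wt.1 1).map (fun v => (bk, wk, (v, wt.2))) := by
      simp [getTowerNeighs, List.filter, hkb, hkw, pvReturnA,
        PySem.List.pyGet?, PySem.List.pyIdx?, (show ¬ wt.1 = bk.1 from by omega)]
    have hDm : 0 ≤ bk.1 ∨ wt.1 - 2 < bk.1 := by
      by_contra hc
      push Not at hc
      refine hD ⟨⟨bk, by simp, by simp [pvBlk, pvAx]; omega⟩, ?_⟩
      intro k hk hkx
      simp only [List.mem_cons, List.not_mem_nil, or_false] at hk
      simp [pvBlk, pvAx] at hkx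
      simp only [pvAx]
      rcases hk with rfl | rfl
      · simp; omega
      · exact absurd (And.intro hkx.1 (by omega)) hw
    rw [hA]
    by_cases h0 : 0 ≤ bk.1
    · exact pv_left_finish bk wk wt (bk.1) (by omega) (by omega)
        (Or.inr (Or.inl (pv_pair_h wt bk hb.1)))
        (fun t ht1 ht2 => ⟨pv_ne_of_fst (show t ≠ bk.1 by omega), pv_free_left wt wk hw t (by omega)⟩)
    · have hgt : wt.1 - 2 < bk.1 := by rcases hDm with h | h <;> omega
      exact pv_left_empty bk wk wt (bk.1) (by omega) (by omega)
  · -- only wk blocks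
    have hkb : pvFilterA "left" wt bk = false := by
      by_cases h1 : bk.2 = wt.2
      · have h2 : ¬ bk.1 < wt.1 := fun h2 => hb ⟨h1, h2⟩
        simp [pvFilterA, h1, h2]
      · have h2 : ¬ wt.2 = bk.2 := fun h => h1 h.symm
        simp [pvFilterA, h2]
    have hkw : pvFilterA "left" wt wk = true := by simp [pvFilterA, hw.1, hw.2]
    have hA : getTowerNeighs bk wk wt "left" =
        (PySem.List.pyRange (wk.1 + 1) wt.1 1).map (fun v => (bk, wk, (v, wt.2))) := by
      simp [getTowerNeighs, List.filter, hkb, hkw, pvReturnA,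
        PySem.List.pyGet?, PySem.List.pyIdx?, (show ¬ wt.1 = wk.1 from by omega)]
    have hDm : 0 ≤ wk.1 ∨ wt.1 - 2 < wk.1 := by
      by_contra hc
      push Not at hc
      refine hD ⟨⟨wk, by simp, by simp [pvBlk, pvAx]; omega⟩, ?_⟩
      intro k hk hkx
      simp only [List.mem_cons, List.not_mem_nil, or_false] at hk
      simp [pvBlk, pvAx] at hkx
      simp only [pvAx]
      rcases hk with rfl | rfl
      · exact absurd (And.intro hkx.1 (by omega)) hb
      · simp; omega
    rw [hA]
    by_cases h0 : 0 ≤ wk.1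
    · exact pv_left_finish bk wk wt (wk.1) (by omega) (by omega)
        (Or.inr (Or.inr (pv_pair_h wt wk hw.1)))
        (fun t ht1 ht2 => ⟨pv_free_left wt bk hb t (by omega), pv_ne_of_fst (show t ≠ wk.1 by omega)⟩)
    · have hgt : wt.1 - 2 < wk.1 := by rcases hDm with h | h <;> omega
      exact pv_left_empty bk wk wt (wk.1) (by omega) (by omega)
  · -- no king blocks
    have hkb : pvFilterA "left" wt bk = false := by
      by_cases h1 : bk.2 = wt.2
      · have h2 : ¬ bk.1 < wt.1 := fun h2 => hb ⟨h1, h2⟩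
        simp [pvFilterA, h1, h2]
      · have h2 : ¬ wt.2 = bk.2 := fun h => h1 h.symm
        simp [pvFilterA, h2]
    have hkw : pvFilterA "left" wt wk = false := by
      by_cases h1 : wk.2 = wt.2
      · have h2 : ¬ wk.1 < wt.1 := fun h2 => hw ⟨h1, h2⟩
        simp [pvFilterA, h1, h2]
      · have h2 : ¬ wt.2 = wk.2 := fun h => h1 h.symm
        simp [pvFilterA, h2]
    have hA : getTowerNeighs bk wk wt "left" =
        (PySem.List.pyRange (0 + 1) wt.1 1).map (fun v => (bk, wk, (v, wt.2))) := by
      simp [getTowerNeighs, List.filter, hkb, hkw, pvReturnA]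
    rw [hA]
    by_cases hpos : 1 ≤ wt.1
    · exact pv_left_finish bk wk wt ((0 : Int)) (by omega) (by omega)
        (Or.inl rfl)
        (fun t ht1 ht2 => ⟨pv_free_left wt bk hb t (by omega), pv_free_left wt wk hw t (by omega)⟩)
    · exact pv_left_empty bk wk wt 0 (by omega) (by omega)

lemma pv_side_right (bk wk wt : Int × Int)
    (hD : ¬ ((∃ k ∈ [bk, wk], pvBlk "right" wt k) ∧
      ∀ k ∈ [bk, wk], pvBlk "right" wt k →
        10 ≤ (pvAx "right" k).2 ∧ (pvAx "right" wt).2 + 2 ≤ (pvAx "right" k).2)) :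
    getTowerNeighs bk wk wt "right" = getTowerNeighs_alt bk wk wt "right" := by
  rw [pv_alt_right]
  by_cases hb : bk.2 = wt.2 ∧ wt.1 < bk.1 <;> by_cases hw : wk.2 = wt.2 ∧ wt.1 < wk.1
  · -- both kings block
    have hkb : pvFilterA "right" wt bk = true := by simp [pvFilterA, hb.1, hb.2]
    have hkw : pvFilterA "right" wt wk = true := by simp [pvFilterA, hw.1, hw.2]
    have hA : getTowerNeighs bk wk wt "right" =
        (PySem.List.pyRange (wt.1 + 1) (min bk.1 wk.1) 1).map (fun v => (bk, wk, (v, wt.2))) := by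
      simp [getTowerNeighs, List.filter, hkb, hkw, pvReturnA,
        PySem.List.pyGet?, PySem.List.pyIdx?, (show ¬ wt.1 = bk.1 from by omega)]
    have hDm : min bk.1 wk.1 ≤ 9 ∨ min bk.1 wk.1 < wt.1 + 2 := by
      by_contra hc
      push Not at hc
      refine hD ⟨⟨bk, by simp, by simp [pvBlk, pvAx]; omega⟩, ?_⟩
      intro k hk hkx
      simp only [List.mem_cons, List.not_mem_nil, or_false] at hk
      simp [pvBlk, pvAx] at hkx
      simp only [pvAx]
      rcases hk with rfl | rfl <;> simp <;> omega
    rcases le_total bk.1 wk.1 with hm | hm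
    · rw [min_eq_left hm] at hA hDm
      rw [hA]
      by_cases h9 : bk.1 ≤ 9
      · exact pv_right_finish bk wk wt (bk.1) (by omega) (by omega)
          (Or.inr (Or.inl (pv_pair_h wt bk hb.1)))
          (fun t ht1 ht2 => ⟨pv_ne_of_fst (show t ≠ bk.1 by omega), pv_ne_of_fst (show t ≠ wk.1 by omega)⟩)
      · have hlt2 : bk.1 < wt.1 + 2 := by rcases hDm with h | h <;> omega
        exact pv_right_empty bk wk wt (bk.1) (by omega) (by omega)
    · rw [min_eq_right hm] at hA hDm
      rw [hA]
      by_cases h9 : wk.1 ≤ 9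
      · exact pv_right_finish bk wk wt (wk.1) (by omega) (by omega)
          (Or.inr (Or.inr (pv_pair_h wt wk hw.1)))
          (fun t ht1 ht2 => ⟨pv_ne_of_fst (show t ≠ bk.1 by omega), pv_ne_of_fst (show t ≠ wk.1 by omega)⟩)
      · have hlt2 : wk.1 < wt.1 + 2 := by rcases hDm with h | h <;> omega
        exact pv_right_empty bk wk wt (wk.1) (by omega) (by omega)
  · -- only bk blocks
    have hkb : pvFilterA "right" wt bk = true := by simp [pvFilterA, hb.1, hb.2]
    have hkw : pvFilterA "right" wt wk = false := by
      by_cases h1 : wk.2 = wt.2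
      · have h2 : ¬ wt.1 < wk.1 := fun h2 => hw ⟨h1, h2⟩
        simp [pvFilterA, h1, h2]
      · have h2 : ¬ wt.2 = wk.2 := fun h => h1 h.symm
        simp [pvFilterA, h2]
    have hA : getTowerNeighs bk wk wt "right" =
        (PySem.List.pyRange (wt.1 + 1) (bk.1) 1).map (fun v => (bk, wk, (v, wt.2))) := by
      simp [getTowerNeighs, List.filter, hkb, hkw, pvReturnA,
        PySem.List.pyGet?, PySem.List.pyIdx?, (show ¬ wt.1 = bk.1 from by omega)]
    have hDm : bk.1 ≤ 9 ∨ bk.1 < wt.1 + 2 := by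
      by_contra hc
      push Not at hc
      refine hD ⟨⟨bk, by simp, by simp [pvBlk, pvAx]; omega⟩, ?_⟩
      intro k hk hkx
      simp only [List.mem_cons, List.not_mem_nil, or_false] at hk
      simp [pvBlk, pvAx] at hkx
      simp only [pvAx]
      rcases hk with rfl | rfl
      · simp; omega
      · exact absurd (And.intro hkx.1 (by omega)) hw
    rw [hA]
    by_cases h9 : bk.1 ≤ 9
    · exact pv_right_finish bk wk wt (bk.1) (by omega) (by omega)
        (Or.inr (Or.inl (pv_pair_h wt bk hb.1)))
        (fun t ht1 ht2 => ⟨pv_ne_of_fst (show t ≠ bk.1 by omega), pv_free_right wt wk hw t (by omega)⟩)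
    · have hlt2 : bk.1 < wt.1 + 2 := by rcases hDm with h | h <;> omega
      exact pv_right_empty bk wk wt (bk.1) (by omega) (by omega)
  · -- only wk blocks
    have hkb : pvFilterA "right" wt bk = false := by
      by_cases h1 : bk.2 = wt.2
      · have h2 : ¬ wt.1 < bk.1 := fun h2 => hb ⟨h1, h2⟩
        simp [pvFilterA, h1, h2]
      · have h2 : ¬ wt.2 = bk.2 := fun h => h1 h.symm
        simp [pvFilterA, h2]
    have hkw : pvFilterA "right" wt wk = true := by simp [pvFilterA, hw.1, hw.2]
    have hA : getTowerNeighs bk wk wt "right" =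
        (PySem.List.pyRange (wt.1 + 1) (wk.1) 1).map (fun v => (bk, wk, (v, wt.2))) := by
      simp [getTowerNeighs, List.filter, hkb, hkw, pvReturnA,
        PySem.List.pyGet?, PySem.List.pyIdx?, (show ¬ wt.1 = wk.1 from by omega)]
    have hDm : wk.1 ≤ 9 ∨ wk.1 < wt.1 + 2 := by
      by_contra hc
      push Not at hc
      refine hD ⟨⟨wk, by simp, by simp [pvBlk, pvAx]; omega⟩, ?_⟩
      intro k hk hkx
      simp only [List.mem_cons, List.not_mem_nil, or_false] at hk
      simp [pvBlk, pvAx] at hkx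
      simp only [pvAx]
      rcases hk with rfl | rfl
      · exact absurd (And.intro hkx.1 (by omega)) hb
      · simp; omega
    rw [hA]
    by_cases h9 : wk.1 ≤ 9
    · exact pv_right_finish bk wk wt (wk.1) (by omega) (by omega)
        (Or.inr (Or.inr (pv_pair_h wt wk hw.1)))
        (fun t ht1 ht2 => ⟨pv_free_right wt bk hb t (by omega), pv_ne_of_fst (show t ≠ wk.1 by omega)⟩)
    · have hlt2 : wk.1 < wt.1 + 2 := by rcases hDm with h | h <;> omega
      exact pv_right_empty bk wk wt (wk.1) (by omega) (by omega)
  · -- no king blocks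
    have hkb : pvFilterA "right" wt bk = false := by
      by_cases h1 : bk.2 = wt.2
      · have h2 : ¬ wt.1 < bk.1 := fun h2 => hb ⟨h1, h2⟩
        simp [pvFilterA, h1, h2]
      · have h2 : ¬ wt.2 = bk.2 := fun h => h1 h.symm
        simp [pvFilterA, h2]
    have hkw : pvFilterA "right" wt wk = false := by
      by_cases h1 : wk.2 = wt.2
      · have h2 : ¬ wt.1 < wk.1 := fun h2 => hw ⟨h1, h2⟩
        simp [pvFilterA, h1, h2]
      · have h2 : ¬ wt.2 = wk.2 := fun h => h1 h.symm
        simp [pvFilterA, h2]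
    have hA : getTowerNeighs bk wk wt "right" =
        (PySem.List.pyRange (wt.1 + 1) (9) 1).map (fun v => (bk, wk, (v, wt.2))) := by
      simp [getTowerNeighs, List.filter, hkb, hkw, pvReturnA]
    rw [hA]
    by_cases hpos : wt.1 ≤ 8
    · exact pv_right_finish bk wk wt ((9 : Int)) (by omega) (by omega)
        (Or.inl rfl)
        (fun t ht1 ht2 => ⟨pv_free_right wt bk hb t (by omega), pv_free_right wt wk hw t (by omega)⟩)
    · exact pv_right_empty bk wk wt 9 (by omega) (by omega)

lemma pv_tight_up (bk wk wt : Int × Int)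
    (hD : (∃ k ∈ [bk, wk], pvBlk "up" wt k) ∧
      ∀ k ∈ [bk, wk], pvBlk "up" wt k →
        10 ≤ (pvAx "up" k).2 ∧ (pvAx "up" wt).2 + 2 ≤ (pvAx "up" k).2) :
    getTowerNeighs bk wk wt "up" ≠ getTowerNeighs_alt bk wk wt "up" := by
  obtain ⟨⟨k0, hk0, hk0b⟩, hall⟩ := hD
  have hallb : (bk.1 = wt.1 ∧ bk.2 < wt.2) → (bk.2 ≤ -1 ∧ bk.2 ≤ wt.2 - 2) := fun hbb => by
    have h := hall bk (by simp) (by simp [pvBlk, pvAx]; omega)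
    simp [pvAx] at h
    omega
  have hallw : (wk.1 = wt.1 ∧ wk.2 < wt.2) → (wk.2 ≤ -1 ∧ wk.2 ≤ wt.2 - 2) := fun hww => by
    have h := hall wk (by simp) (by simp [pvBlk, pvAx]; omega)
    simp [pvAx] at h
    omega
  rw [pv_alt_up]
  by_cases hb : bk.1 = wt.1 ∧ bk.2 < wt.2 <;> by_cases hw : wk.1 = wt.1 ∧ wk.2 < wt.2
  · -- both kings block
    have hkb : pvFilterA "up" wt bk = true := by simp [pvFilterA, hb.1, hb.2]
    have hkw : pvFilterA "up" wt wk = true := by simp [pvFilterA, hw.1, hw.2]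
    have hA : getTowerNeighs bk wk wt "up" =
        (PySem.List.pyRange (max bk.2 wk.2 + 1) wt.2 1).map (fun v => (bk, wk, (wt.1, v))) := by
      simp [getTowerNeighs, List.filter, hkb, hkw, pvReturnA,
        PySem.List.pyGet?, PySem.List.pyIdx?, hb.1]
    rw [hA]
    intro hEq
    have h1 := hallb hb
    have h2 := hallw hw
    exact pv_absurd_up bk wk wt (max bk.2 wk.2) (by omega) (by omega) hEq
  · -- only bk blocks
    have hkb : pvFilterA "up" wt bk = true := by simp [pvFilterA, hb.1, hb.2]
    have hkw : pvFilterA "up" wt wk = false := by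
      by_cases h1 : wk.1 = wt.1
      · have h2 : ¬ wk.2 < wt.2 := fun h2 => hw ⟨h1, h2⟩
        simp [pvFilterA, h1, h2]
      · have h2 : ¬ wt.1 = wk.1 := fun h => h1 h.symm
        simp [pvFilterA, h2]
    have hA : getTowerNeighs bk wk wt "up" =
        (PySem.List.pyRange (bk.2 + 1) wt.2 1).map (fun v => (bk, wk, (wt.1, v))) := by
      simp [getTowerNeighs, List.filter, hkb, hkw, pvReturnA,
        PySem.List.pyGet?, PySem.List.pyIdx?, hb.1]
    rw [hA]
    intro hEq
    have h1 := hallb hb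
    exact pv_absurd_up bk wk wt (bk.2) (by omega) (by omega) hEq
  · -- only wk blocks
    have hkb : pvFilterA "up" wt bk = false := by
      by_cases h1 : bk.1 = wt.1
      · have h2 : ¬ bk.2 < wt.2 := fun h2 => hb ⟨h1, h2⟩
        simp [pvFilterA, h1, h2]
      · have h2 : ¬ wt.1 = bk.1 := fun h => h1 h.symm
        simp [pvFilterA, h2]
    have hkw : pvFilterA "up" wt wk = true := by simp [pvFilterA, hw.1, hw.2]
    have hA : getTowerNeighs bk wk wt "up" =
        (PySem.List.pyRange (wk.2 + 1) wt.2 1).map (fun v => (bk, wk, (wt.1, v))) := by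
      simp [getTowerNeighs, List.filter, hkb, hkw, pvReturnA,
        PySem.List.pyGet?, PySem.List.pyIdx?, hw.1]
    rw [hA]
    intro hEq
    have h1 := hallw hw
    exact pv_absurd_up bk wk wt (wk.2) (by omega) (by omega) hEq
  · -- no king blocks: contradicts the witness blocker
    exfalso
    simp only [List.mem_cons, List.not_mem_nil, or_false] at hk0
    simp [pvBlk, pvAx] at hk0b
    rcases hk0 with rfl | rfl
    · exact hb ⟨hk0b.1, by omega⟩
    · exact hw ⟨hk0b.1, by omega⟩

lemma pv_tight_down (bk wk wt : Int × Int)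
    (hD : (∃ k ∈ [bk, wk], pvBlk "down" wt k) ∧
      ∀ k ∈ [bk, wk], pvBlk "down" wt k →
        10 ≤ (pvAx "down" k).2 ∧ (pvAx "down" wt).2 + 2 ≤ (pvAx "down" k).2) :
    getTowerNeighs bk wk wt "down" ≠ getTowerNeighs_alt bk wk wt "down" := by
  obtain ⟨⟨k0, hk0, hk0b⟩, hall⟩ := hD
  have hallb : (bk.1 = wt.1 ∧ wt.2 < bk.2) → (10 ≤ bk.2 ∧ wt.2 + 2 ≤ bk.2) := fun hbb => by
    have h := hall bk (by simp) (by simp [pvBlk, pvAx]; omega)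
    simp [pvAx] at h
    omega
  have hallw : (wk.1 = wt.1 ∧ wt.2 < wk.2) → (10 ≤ wk.2 ∧ wt.2 + 2 ≤ wk.2) := fun hww => by
    have h := hall wk (by simp) (by simp [pvBlk, pvAx]; omega)
    simp [pvAx] at h
    omega
  rw [pv_alt_down]
  by_cases hb : bk.1 = wt.1 ∧ wt.2 < bk.2 <;> by_cases hw : wk.1 = wt.1 ∧ wt.2 < wk.2
  · -- both kings block
    have hkb : pvFilterA "down" wt bk = true := by simp [pvFilterA, hb.1, hb.2]
    have hkw : pvFilterA "down" wt wk = true := by simp [pvFilterA, hw.1, hw.2]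
    have hA : getTowerNeighs bk wk wt "down" =
        (PySem.List.pyRange (wt.2 + 1) (min bk.2 wk.2) 1).map (fun v => (bk, wk, (wt.1, v))) := by
      simp [getTowerNeighs, List.filter, hkb, hkw, pvReturnA,
        PySem.List.pyGet?, PySem.List.pyIdx?, hb.1]
    rw [hA]
    intro hEq
    have h1 := hallb hb
    have h2 := hallw hw
    exact pv_absurd_down bk wk wt (min bk.2 wk.2) (by omega) (by omega) hEq
  · -- only bk blocks
    have hkb : pvFilterA "down" wt bk = true := by simp [pvFilterA, hb.1, hb.2]
    have hkw : pvFilterA "down" wt wk = false := by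
      by_cases h1 : wk.1 = wt.1
      · have h2 : ¬ wt.2 < wk.2 := fun h2 => hw ⟨h1, h2⟩
        simp [pvFilterA, h1, h2]
      · have h2 : ¬ wt.1 = wk.1 := fun h => h1 h.symm
        simp [pvFilterA, h2]
    have hA : getTowerNeighs bk wk wt "down" =
        (PySem.List.pyRange (wt.2 + 1) (bk.2) 1).map (fun v => (bk, wk, (wt.1, v))) := by
      simp [getTowerNeighs, List.filter, hkb, hkw, pvReturnA,
        PySem.List.pyGet?, PySem.List.pyIdx?, hb.1]
    rw [hA]
    intro hEq
    have h1 := hallb hb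
    exact pv_absurd_down bk wk wt (bk.2) (by omega) (by omega) hEq
  · -- only wk blocks
    have hkb : pvFilterA "down" wt bk = false := by
      by_cases h1 : bk.1 = wt.1
      · have h2 : ¬ wt.2 < bk.2 := fun h2 => hb ⟨h1, h2⟩
        simp [pvFilterA, h1, h2]
      · have h2 : ¬ wt.1 = bk.1 := fun h => h1 h.symm
        simp [pvFilterA, h2]
    have hkw : pvFilterA "down" wt wk = true := by simp [pvFilterA, hw.1, hw.2]
    have hA : getTowerNeighs bk wk wt "down" =
        (PySem.List.pyRange (wt.2 + 1) (wk.2) 1).map (fun v => (bk, wk, (wt.1, v))) := by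
      simp [getTowerNeighs, List.filter, hkb, hkw, pvReturnA,
        PySem.List.pyGet?, PySem.List.pyIdx?, hw.1]
    rw [hA]
    intro hEq
    have h1 := hallw hw
    exact pv_absurd_down bk wk wt (wk.2) (by omega) (by omega) hEq
  · -- no king blocks: contradicts the witness blocker
    exfalso
    simp only [List.mem_cons, List.not_mem_nil, or_false] at hk0
    simp [pvBlk, pvAx] at hk0b
    rcases hk0 with rfl | rfl
    · exact hb ⟨hk0b.1, by omega⟩
    · exact hw ⟨hk0b.1, by omega⟩

lemma pv_tight_left (bk wk wt : Int × Int)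
    (hD : (∃ k ∈ [bk, wk], pvBlk "left" wt k) ∧
      ∀ k ∈ [bk, wk], pvBlk "left" wt k →
        10 ≤ (pvAx "left" k).2 ∧ (pvAx "left" wt).2 + 2 ≤ (pvAx "left" k).2) :
    getTowerNeighs bk wk wt "left" ≠ getTowerNeighs_alt bk wk wt "left" := by
  obtain ⟨⟨k0, hk0, hk0b⟩, hall⟩ := hD
  have hallb : (bk.2 = wt.2 ∧ bk.1 < wt.1) → (bk.1 ≤ -1 ∧ bk.1 ≤ wt.1 - 2) := fun hbb => by
    have h := hall bk (by simp) (by simp [pvBlk, pvAx]; omega)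
    simp [pvAx] at h
    omega
  have hallw : (wk.2 = wt.2 ∧ wk.1 < wt.1) → (wk.1 ≤ -1 ∧ wk.1 ≤ wt.1 - 2) := fun hww => by
    have h := hall wk (by simp) (by simp [pvBlk, pvAx]; omega)
    simp [pvAx] at h
    omega
  rw [pv_alt_left]
  by_cases hb : bk.2 = wt.2 ∧ bk.1 < wt.1 <;> by_cases hw : wk.2 = wt.2 ∧ wk.1 < wt.1
  · -- both kings block
    have hkb : pvFilterA "left" wt bk = true := by simp [pvFilterA, hb.1, hb.2]
    have hkw : pvFilterA "left" wt wk = true := by simp [pvFilterA, hw.1, hw.2]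
    have hA : getTowerNeighs bk wk wt "left" =
        (PySem.List.pyRange (max bk.1 wk.1 + 1) wt.1 1).map (fun v => (bk, wk, (v, wt.2))) := by
      simp [getTowerNeighs, List.filter, hkb, hkw, pvReturnA,
        PySem.List.pyGet?, PySem.List.pyIdx?, (show ¬ wt.1 = bk.1 from by omega)]
    rw [hA]
    intro hEq
    have h1 := hallb hb
    have h2 := hallw hw
    exact pv_absurd_left bk wk wt (max bk.1 wk.1) (by omega) (by omega) hEq
  · -- only bk blocks
    have hkb : pvFilterA "left" wt bk = true := by simp [pvFilterA, hb.1, hb.2]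
    have hkw : pvFilterA "left" wt wk = false := by
      by_cases h1 : wk.2 = wt.2
      · have h2 : ¬ wk.1 < wt.1 := fun h2 => hw ⟨h1, h2⟩
        simp [pvFilterA, h1, h2]
      · have h2 : ¬ wt.2 = wk.2 := fun h => h1 h.symm
        simp [pvFilterA, h2]
    have hA : getTowerNeighs bk wk wt "left" =
        (PySem.List.pyRange (bk.1 + 1) wt.1 1).map (fun v => (bk, wk, (v, wt.2))) := by
      simp [getTowerNeighs, List.filter, hkb, hkw, pvReturnA,
        PySem.List.pyGet?, PySem.List.pyIdx?, (show ¬ wt.1 = bk.1 from by omega)]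
    rw [hA]
    intro hEq
    have h1 := hallb hb
    exact pv_absurd_left bk wk wt (bk.1) (by omega) (by omega) hEq
  · -- only wk blocks
    have hkb : pvFilterA "left" wt bk = false := by
      by_cases h1 : bk.2 = wt.2
      · have h2 : ¬ bk.1 < wt.1 := fun h2 => hb ⟨h1, h2⟩
        simp [pvFilterA, h1, h2]
      · have h2 : ¬ wt.2 = bk.2 := fun h => h1 h.symm
        simp [pvFilterA, h2]
    have hkw : pvFilterA "left" wt wk = true := by simp [pvFilterA, hw.1, hw.2]
    have hA : getTowerNeighs bk wk wt "left" =
        (PySem.List.pyRange (wk.1 + 1) wt.1 1).map (fun v => (bk, wk, (v, wt.2))) := by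
      simp [getTowerNeighs, List.filter, hkb, hkw, pvReturnA,
        PySem.List.pyGet?, PySem.List.pyIdx?, (show ¬ wt.1 = wk.1 from by omega)]
    rw [hA]
    intro hEq
    have h1 := hallw hw
    exact pv_absurd_left bk wk wt (wk.1) (by omega) (by omega) hEq
  · -- no king blocks: contradicts the witness blocker
    exfalso
    simp only [List.mem_cons, List.not_mem_nil, or_false] at hk0
    simp [pvBlk, pvAx] at hk0b
    rcases hk0 with rfl | rfl
    · exact hb ⟨hk0b.1, by omega⟩
    · exact hw ⟨hk0b.1, by omega⟩

lemma pv_tight_right (bk wk wt : Int × Int)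
    (hD : (∃ k ∈ [bk, wk], pvBlk "right" wt k) ∧
      ∀ k ∈ [bk, wk], pvBlk "right" wt k →
        10 ≤ (pvAx "right" k).2 ∧ (pvAx "right" wt).2 + 2 ≤ (pvAx "right" k).2) :
    getTowerNeighs bk wk wt "right" ≠ getTowerNeighs_alt bk wk wt "right" := by
  obtain ⟨⟨k0, hk0, hk0b⟩, hall⟩ := hD
  have hallb : (bk.2 = wt.2 ∧ wt.1 < bk.1) → (10 ≤ bk.1 ∧ wt.1 + 2 ≤ bk.1) := fun hbb => by
    have h := hall bk (by simp) (by simp [pvBlk, pvAx]; omega)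
    simp [pvAx] at h
    omega
  have hallw : (wk.2 = wt.2 ∧ wt.1 < wk.1) → (10 ≤ wk.1 ∧ wt.1 + 2 ≤ wk.1) := fun hww => by
    have h := hall wk (by simp) (by simp [pvBlk, pvAx]; omega)
    simp [pvAx] at h
    omega
  rw [pv_alt_right]
  by_cases hb : bk.2 = wt.2 ∧ wt.1 < bk.1 <;> by_cases hw : wk.2 = wt.2 ∧ wt.1 < wk.1
  · -- both kings block
    have hkb : pvFilterA "right" wt bk = true := by simp [pvFilterA, hb.1, hb.2]
    have hkw : pvFilterA "right" wt wk = true := by simp [pvFilterA, hw.1, hw.2]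
    have hA : getTowerNeighs bk wk wt "right" =
        (PySem.List.pyRange (wt.1 + 1) (min bk.1 wk.1) 1).map (fun v => (bk, wk, (v, wt.2))) := by
      simp [getTowerNeighs, List.filter, hkb, hkw, pvReturnA,
        PySem.List.pyGet?, PySem.List.pyIdx?, (show ¬ wt.1 = bk.1 from by omega)]
    rw [hA]
    intro hEq
    have h1 := hallb hb
    have h2 := hallw hw
    exact pv_absurd_right bk wk wt (min bk.1 wk.1) (by omega) (by omega) hEq
  · -- only bk blocks
    have hkb : pvFilterA "right" wt bk = true := by simp [pvFilterA, hb.1, hb.2]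
    have hkw : pvFilterA "right" wt wk = false := by
      by_cases h1 : wk.2 = wt.2
      · have h2 : ¬ wt.1 < wk.1 := fun h2 => hw ⟨h1, h2⟩
        simp [pvFilterA, h1, h2]
      · have h2 : ¬ wt.2 = wk.2 := fun h => h1 h.symm
        simp [pvFilterA, h2]
    have hA : getTowerNeighs bk wk wt "right" =
        (PySem.List.pyRange (wt.1 + 1) (bk.1) 1).map (fun v => (bk, wk, (v, wt.2))) := by
      simp [getTowerNeighs, List.filter, hkb, hkw, pvReturnA,
        PySem.List.pyGet?, PySem.List.pyIdx?, (show ¬ wt.1 = bk.1 from by omega)]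
    rw [hA]
    intro hEq
    have h1 := hallb hb
    exact pv_absurd_right bk wk wt (bk.1) (by omega) (by omega) hEq
  · -- only wk blocks
    have hkb : pvFilterA "right" wt bk = false := by
      by_cases h1 : bk.2 = wt.2
      · have h2 : ¬ wt.1 < bk.1 := fun h2 => hb ⟨h1, h2⟩
        simp [pvFilterA, h1, h2]
      · have h2 : ¬ wt.2 = bk.2 := fun h => h1 h.symm
        simp [pvFilterA, h2]
    have hkw : pvFilterA "right" wt wk = true := by simp [pvFilterA, hw.1, hw.2]
    have hA : getTowerNeighs bk wk wt "right" =
        (PySem.List.pyRange (wt.1 + 1) (wk.1) 1).map (fun v => (bk, wk, (v, wt.2))) := by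
      simp [getTowerNeighs, List.filter, hkb, hkw, pvReturnA,
        PySem.List.pyGet?, PySem.List.pyIdx?, (show ¬ wt.1 = wk.1 from by omega)]
    rw [hA]
    intro hEq
    have h1 := hallw hw
    exact pv_absurd_right bk wk wt (wk.1) (by omega) (by omega) hEq
  · -- no king blocks: contradicts the witness blocker
    exfalso
    simp only [List.mem_cons, List.not_mem_nil, or_false] at hk0
    simp [pvBlk, pvAx] at hk0b
    rcases hk0 with rfl | rfl
    · exact hb ⟨hk0b.1, by omega⟩
    · exact hw ⟨hk0b.1, by omega⟩

-- ===== VERDICT (by name: the statement is the Claim_ definition above) =====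
theorem getTowerNeighs_spec : Claim_unchanged_getTowerNeighs := by
  intro bk wk wt side _ hpre
  intro hD
  unfold D_getTowerNeighs at hD
  rcases hpre with h | h | h | h <;> subst h
  · exact pv_side_up bk wk wt hD
  · exact pv_side_down bk wk wt hD
  · exact pv_side_left bk wk wt hD
  · exact pv_side_right bk wk wt hD

theorem getTowerNeighs_changed : Claim_changed_getTowerNeighs := by
  unfold Claim_changed_getTowerNeighs; decide

theorem getTowerNeighs_tight : Claim_exact_getTowerNeighs := by
  intro bk wk wt side _ hpre hD
  unfold D_getTowerNeighs at hD
  rcases hpre with h | h | h | h <;> subst h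
  · exact pv_tight_up bk wk wt hD
  · exact pv_tight_down bk wk wt hD
  · exact pv_tight_left bk wk wt hD
  · exact pv_tight_right bk wk wt hD
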